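-- pv_equiv track=rewrite | github.com/daviddavini/ai-club-tic-tac-toe | agents.py | combine_multiline_strings
-- ===== SOURCE A (Python) =====
-- def combine_multiline_strings(strings, sep='\t'):
--     lines = []
--     #The size of each line so far (used for new lines)
--     emptyline = ''
--     for string in strings:
--         #Add seperation between this line and previous line
--         for i in range(len(lines)):
--             lines[i] += sep
--         if len(lines) != 0:
--             emptyline += sep
--         #Add string to lines
--         split = string.splitlines()
--         maxlength = max(len(l) for l in split)
--         for i in range(len(lines)):
--             if len(split) != 0:
--                 l = split.pop(0)
--             else:
--                 l = ''
--             lines[i] += l + ' '*(maxlength - len(l))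
--         for l in split:
--             line = emptyline + l
--             lines.append(line)
--         #Update linelength
--         emptyline += ' '*maxlength
--     return '\n'.join(lines)
-- ===== SOURCE B (Python) =====
-- def combine_multiline_strings(strings, sep='\t'):
--     splits = [s.splitlines() for s in strings]
--     widths = [max(len(l) for l in sp) for sp in splits]
--     nrows = max((len(sp) for sp in splits), default=0)
--     out = []
--     for r in range(nrows):
--         pre = ''
--         for c, (sp, w) in enumerate(zip(splits, widths)):
--             if r < len(sp):
--                 cells = [sep + (splits[j][r] if r < len(splits[j]) else '').ljust(widths[j])
--                          for j in range(c + 1, len(splits))]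
--                 out.append(pre + sp[r] + ''.join(cells))
--                 break
--             pre += ' ' * w + sep
--     return '\n'.join(out)
-- ===== Notes on version B (the rewrite author's own statement) =====
-- stated objective: faster
-- what changed: A builds the output column-by-column, re-extending every already-existing line once per input string (appending the separator and the padded cell to each); B precomputes each string's splitlines and column width and emits the picture row-by-row, constructing every output row once from the first column that owns it.
import Mathlib
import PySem

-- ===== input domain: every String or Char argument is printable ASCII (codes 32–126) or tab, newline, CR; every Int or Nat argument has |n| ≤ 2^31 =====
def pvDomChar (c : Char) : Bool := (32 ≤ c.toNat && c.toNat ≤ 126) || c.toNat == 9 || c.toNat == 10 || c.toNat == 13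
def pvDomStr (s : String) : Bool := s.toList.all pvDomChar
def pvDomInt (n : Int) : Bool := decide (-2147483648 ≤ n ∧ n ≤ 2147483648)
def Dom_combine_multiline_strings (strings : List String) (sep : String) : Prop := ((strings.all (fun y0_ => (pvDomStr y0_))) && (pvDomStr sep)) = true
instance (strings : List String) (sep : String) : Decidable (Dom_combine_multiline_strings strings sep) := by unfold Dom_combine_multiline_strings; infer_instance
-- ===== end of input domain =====

-- B lays the picture out row-by-row instead of A's column-by-column mutation of a growing
-- line list; equivalence of the two traversal orders is proved on every input whose strings
-- are all nonempty (on an empty string both programs raise ValueError from max()).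

-- ===== PORT A =====
-- l + ' '*(maxlength - len(l))   (Python's negative repeat gives '', like Nat subtraction)
def pvCellPadA (m : Nat) (l : List Char) : List Char := l ++ List.replicate (m - l.length) ' '

-- the loop 'for i in range(len(lines)): l = split.pop(0) if split else ""; lines[i] += l + pad'
def pvFillA (m : Nat) : List (List Char) → List (List Char) → List (List Char) × List (List Char)
  | [], split => ([], split)
  | ln :: rest, [] =>
      let r := pvFillA m rest []
      ((ln ++ pvCellPadA m []) :: r.1, r.2)
  | ln :: rest, l :: t =>
      let r := pvFillA m rest t
      ((ln ++ pvCellPadA m l) :: r.1, r.2)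

-- the body of 'for string in strings' over the state (lines, emptyline)
def pvStepA (sepL : List Char) (st : List (List Char) × List Char) (s : String) :
    List (List Char) × List Char :=
  let lines := st.1.map (· ++ sepL)
  let emptyline := if st.1.length ≠ 0 then st.2 ++ sepL else st.2
  let split := PySem.Chars.splitlines s.toList
  let m := (split.map List.length).foldl Nat.max 0   -- max(len(l) for l in split); raises on split = []
  let fr := pvFillA m lines split
  (fr.1 ++ fr.2.map (fun l => emptyline ++ l), emptyline ++ List.replicate m ' ')

def combine_multiline_strings (strings : List String) (sep : String) : String :=
  String.ofList (PySem.Chars.join ['\n'] (strings.foldl (pvStepA sep.toList) ([], [])).1)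

-- ===== PORT B =====
-- (splits[j][r] if r < len(splits[j]) else '').ljust(widths[j])
def pvCellB (r : Nat) (p : List (List Char) × Nat) : List Char :=
  let cell := p.1.getD r []
  cell ++ List.replicate (p.2 - cell.length) ' '

-- the inner 'for c, (sp, w) in enumerate(zip(splits, widths))' scan producing row r
def pvRowB (sepL : List Char) (r : Nat) : List (List (List Char) × Nat) → List Char → List Char
  | [], pre => pre            -- never reached for r < nrows
  | p :: rest, pre =>
      if r < p.1.length then
        pre ++ p.1.getD r [] ++ (rest.map (fun q => sepL ++ pvCellB r q)).flatten
      else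
        pvRowB sepL r rest (pre ++ List.replicate p.2 ' ' ++ sepL)

def combine_multiline_strings_alt (strings : List String) (sep : String) : String :=
  let sepL := sep.toList
  let splits := strings.map (fun s => PySem.Chars.splitlines s.toList)
  let widths := splits.map (fun sp => (sp.map List.length).foldl Nat.max 0)
  let cols := splits.zip widths
  let nrows := (splits.map List.length).foldl Nat.max 0
  String.ofList (PySem.Chars.join ['\n'] ((List.range nrows).map (fun r => pvRowB sepL r cols [])))

-- ===== PRECONDITION & SPEC =====
-- Pre_ excludes exactly the inputs containing an empty string: there A (and B alike) raises
-- ValueError from max() over the empty splitlines list.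
def Pre_combine_multiline_strings (strings : List String) (sep : String) : Prop :=
  "" ∉ strings
instance (strings : List String) (sep : String) : Decidable (Pre_combine_multiline_strings strings sep) := by unfold Pre_combine_multiline_strings; infer_instance

def pvWitness_combine_multiline_strings : List String × String := (["ab\ncd", "x"], "\t")

def Spec_combine_multiline_strings (strings : List String) (sep : String) (out : String) : Prop := out = combine_multiline_strings_alt strings sep
instance (strings : List String) (sep : String) (out : String) : Decidable (Spec_combine_multiline_strings strings sep out) := by unfold Spec_combine_multiline_strings; infer_instance

-- ===== CLAIM (what is proved, stated in full; the proofs are below) =====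
def Claim_equal_combine_multiline_strings : Prop := ∀ (strings : List String) (sep : String), Dom_combine_multiline_strings strings sep → Pre_combine_multiline_strings strings sep → Spec_combine_multiline_strings strings sep (combine_multiline_strings strings sep)

-- ===== LEMMAS AND PROOFS =====

-- the per-string data A and B both derive: (splitlines, column width)
def pvCols (strings : List String) : List (List (List Char) × Nat) :=
  strings.map (fun s =>
    (PySem.Chars.splitlines s.toList,
     ((PySem.Chars.splitlines s.toList).map List.length).foldl Nat.max 0))

-- number of rows contributed by the columns L
def pvM (L : List (List (List Char) × Nat)) : Nat := (L.map (fun p => p.1.length)).foldl Nat.max 0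

-- the all-blank prefix INCLUDING a trailing separator after each column
def pvP (sepL : List Char) (L : List (List (List Char) × Nat)) : List Char :=
  (L.map (fun p => List.replicate p.2 ' ' ++ sepL)).flatten

-- A's 'emptyline' after processing the columns L (no trailing separator)
def pvE (sepL : List Char) (L : List (List (List Char) × Nat)) : List Char :=
  pvP sepL L.dropLast ++ (match L.getLast? with | none => [] | some x => List.replicate x.2 ' ')

theorem pv_foldl_max_init (xs : List Nat) (a : Nat) : a ≤ xs.foldl Nat.max a := by
  induction xs generalizing a with
  | nil => exact le_rfl
  | cons x xs ih => exact le_trans (Nat.le_max_left a x) (ih (Nat.max a x))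

theorem pv_le_foldl_max {x : Nat} {xs : List Nat} (h : x ∈ xs) (a : Nat) :
    x ≤ xs.foldl Nat.max a := by
  induction xs generalizing a with
  | nil => cases h
  | cons y ys ih =>
    rcases List.mem_cons.mp h with rfl | hm
    · exact le_trans (Nat.le_max_right a x) (pv_foldl_max_init ys _)
    · exact ih hm _

theorem pv_exists_of_lt_foldl_max {r : Nat} {xs : List Nat} {a : Nat}
    (h : r < xs.foldl Nat.max a) : r < a ∨ ∃ x ∈ xs, r < x := by
  induction xs generalizing a with
  | nil => exact Or.inl h
  | cons y ys ih =>
    rcases ih (a := Nat.max a y) h with h' | ⟨x, hx, hr⟩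
    · rcases lt_max_iff.mp h' with h1 | h2
      · exact Or.inl h1
      · exact Or.inr ⟨y, List.mem_cons_self .., h2⟩
    · exact Or.inr ⟨x, List.mem_cons_of_mem _ hx, hr⟩

theorem pv_go_len (isB : Char → Bool) (s cur : List Char) (acc : List (List Char)) :
    acc.length ≤ (PySem.Chars.splitlines.go isB s cur acc).length ∧
    (s ≠ [] ∨ cur ≠ [] → acc.length < (PySem.Chars.splitlines.go isB s cur acc).length) := by
  fun_induction PySem.Chars.splitlines.go isB s cur acc with
  | case1 cur acc h =>
    have hc : cur = [] := List.isEmpty_iff.mp h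
    subst hc
    exact ⟨by simp, by simp⟩
  | case2 cur acc h =>
    refine ⟨by simp, fun _ => by simp⟩
  | case3 rest cur acc ih =>
    obtain ⟨h1, h2⟩ := ih
    simp only [List.length_cons] at h1
    exact ⟨by omega, fun _ => by omega⟩
  | case4 c rest cur acc hx h ih =>
    obtain ⟨h1, h2⟩ := ih
    simp only [List.length_cons] at h1
    exact ⟨by omega, fun _ => by omega⟩
  | case5 c rest cur acc hx h ih =>
    obtain ⟨h1, h2⟩ := ih
    have h3 := h2 (Or.inr (by simp))
    exact ⟨h1, fun _ => h3⟩

theorem pv_splitlines_ne_nil {cs : List Char} (h : cs ≠ []) :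
    PySem.Chars.splitlines cs ≠ [] := by
  have key : ∀ isB : Char → Bool, PySem.Chars.splitlines.go isB cs [] [] ≠ [] := by
    intro isB hnil
    have h2 := (pv_go_len isB cs [] []).2 (Or.inl h)
    rw [hnil] at h2
    simp at h2
  intro hnil
  simp only [PySem.Chars.splitlines] at hnil
  exact key _ hnil

theorem pvFillA_fst_length (m : Nat) :
    ∀ (lines sp : List (List Char)), (pvFillA m lines sp).1.length = lines.length := by
  intro lines
  induction lines with
  | nil => intro sp; rfl
  | cons ln rest ih => intro sp; cases sp <;> simp [pvFillA, ih]

theorem pvFillA_snd (m : Nat) :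
    ∀ (lines sp : List (List Char)), (pvFillA m lines sp).2 = sp.drop lines.length := by
  intro lines
  induction lines with
  | nil => intro sp; rfl
  | cons ln rest ih => intro sp; cases sp <;> simp [pvFillA, ih]

theorem pvFillA_fst_get (m : Nat) :
    ∀ (lines sp : List (List Char)) (i : Nat) (h : i < lines.length)
      (h' : i < (pvFillA m lines sp).1.length),
      (pvFillA m lines sp).1[i] = lines[i] ++ pvCellPadA m (sp.getD i []) := by
  intro lines
  induction lines with
  | nil => intro sp i h h'; simp at h
  | cons ln rest ih =>
    intro sp i h h'
    cases sp with
    | nil =>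
      cases i with
      | zero => simp [pvFillA]
      | succ j =>
        simp only [pvFillA, List.getElem_cons_succ]
        exact ih [] j (by simpa using h) (by simpa [pvFillA_fst_length] using h)
    | cons l t =>
      cases i with
      | zero => simp [pvFillA]
      | succ j =>
        simp only [pvFillA, List.getElem_cons_succ, List.getD_cons_succ]
        exact ih t j (by simpa using h) (by simpa [pvFillA_fst_length] using h)

theorem pvRowB_snoc_found (sepL : List Char) (r : Nat) (x : List (List Char) × Nat) :
    ∀ (L : List (List (List Char) × Nat)) (pre : List Char),
      (∃ p ∈ L, r < p.1.length) →
      pvRowB sepL r (L ++ [x]) pre = pvRowB sepL r L pre ++ (sepL ++ pvCellB r x) := by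
  intro L
  induction L with
  | nil =>
    rintro pre ⟨p, hp, _⟩
    cases hp
  | cons q Lt ih =>
    intro pre hex
    by_cases hq : r < q.1.length
    · simp [pvRowB, hq, List.append_assoc]
    · have hex' : ∃ p ∈ Lt, r < p.1.length := by
        rcases hex with ⟨p, hp, hr⟩
        rcases List.mem_cons.mp hp with rfl | hm
        · exact absurd hr hq
        · exact ⟨p, hm, hr⟩
      simp only [List.cons_append, pvRowB, hq, if_false]
      exact ih _ hex'

theorem pvRowB_all_ge (sepL : List Char) (r : Nat) (T : List (List (List Char) × Nat)) :
    ∀ (L : List (List (List Char) × Nat)) (pre : List Char),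
      (∀ p ∈ L, p.1.length ≤ r) →
      pvRowB sepL r (L ++ T) pre = pvRowB sepL r T (pre ++ pvP sepL L) := by
  intro L
  induction L with
  | nil => intro pre _; simp [pvP]
  | cons q Lt ih =>
    intro pre hall
    have hq : ¬ r < q.1.length := by
      have := hall q (List.mem_cons_self ..)
      omega
    simp only [List.cons_append, pvRowB, hq, if_false]
    rw [ih _ (fun p hp => hall p (List.mem_cons_of_mem _ hp))]
    congr 1
    simp [pvP, List.append_assoc]

theorem pvE_snoc (sepL : List Char) (L : List (List (List Char) × Nat)) (x : List (List Char) × Nat) :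
    pvE sepL (L ++ [x]) = pvP sepL L ++ List.replicate x.2 ' ' := by
  simp [pvE]

theorem pvE_sep (sepL : List Char) {L : List (List (List Char) × Nat)} (h : L ≠ []) :
    pvE sepL L ++ sepL = pvP sepL L := by
  rcases List.eq_nil_or_concat L with rfl | ⟨L', x, rfl⟩
  · exact absurd rfl h
  · rw [List.concat_eq_append, pvE_snoc]
    simp [pvP, List.append_assoc]

theorem pvM_pos {L : List (List (List Char) × Nat)} (h : L ≠ [])
    (hne : ∀ p ∈ L, p.1 ≠ []) : 0 < pvM L := by
  cases L with
  | nil => exact absurd rfl h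
  | cons q t =>
    have h1 : q.1.length ∈ ((q :: t).map fun p => p.1.length) := by simp
    have h2 := pv_le_foldl_max h1 0
    have h3 : q.1 ≠ [] := hne q (List.mem_cons_self ..)
    have h4 : 0 < q.1.length := List.length_pos_iff.mpr h3
    unfold pvM
    omega

theorem pvInvA (sepL : List Char) :
    ∀ (strings : List String), (∀ s ∈ strings, s ≠ "") →
      strings.foldl (pvStepA sepL) ([], []) =
        ((List.range (pvM (pvCols strings))).map (fun r => pvRowB sepL r (pvCols strings) []),
         pvE sepL (pvCols strings)) := by
  intro strings
  induction strings using List.reverseRecOn with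
  | nil => intro _; rfl
  | append_singleton L s ih =>
    intro hne
    have hL : ∀ t ∈ L, t ≠ "" := fun t ht => hne t (List.mem_append_left _ ht)
    have hs : s ≠ "" := hne s (by simp)
    have hsl : s.toList ≠ [] := fun h => hs (by simpa using congrArg String.ofList h)
    have hspn : PySem.Chars.splitlines s.toList ≠ [] := pv_splitlines_ne_nil hsl
    have hCne : ∀ p ∈ pvCols L, p.1 ≠ [] := by
      intro p hp
      simp only [pvCols, List.mem_map] at hp
      obtain ⟨t, ht, rfl⟩ := hp
      exact pv_splitlines_ne_nil (fun h0 => hL t ht (by simpa using congrArg String.ofList h0))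
    rw [List.foldl_append, ih hL]
    simp only [List.foldl_cons, List.foldl_nil]
    have hcols : pvCols (L ++ [s]) = pvCols L ++
        [(PySem.Chars.splitlines s.toList,
          ((PySem.Chars.splitlines s.toList).map List.length).foldl Nat.max 0)] := by
      simp [pvCols]
    rw [hcols]
    simp only [pvStepA]
    have hlen : ((List.range (pvM (pvCols L))).map (fun r => pvRowB sepL r (pvCols L) [])).length
        = pvM (pvCols L) := by simp
    have hempty :
        (if ((List.range (pvM (pvCols L))).map (fun r => pvRowB sepL r (pvCols L) [])).length ≠ 0
          then pvE sepL (pvCols L) ++ sepL else pvE sepL (pvCols L)) = pvP sepL (pvCols L) := by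
      by_cases hCnil : pvCols L = []
      · rw [hCnil]
        simp [pvE, pvP, pvM]
      · have hpos := pvM_pos hCnil hCne
        rw [hlen] at *
        rw [if_pos (by omega)]
        exact pvE_sep sepL hCnil
    rw [hempty]
    set C := pvCols L with hC
    set sp := PySem.Chars.splitlines s.toList with hsp
    set m := (sp.map List.length).foldl Nat.max 0 with hm
    set lines := ((List.range (pvM C)).map (fun r => pvRowB sepL r C [])).map (· ++ sepL) with hlines
    have hlineslen : lines.length = pvM C := by simp [hlines]
    have hMx : pvM (C ++ [(sp, m)]) = Nat.max (pvM C) sp.length := by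
      simp [pvM, List.foldl_append]
    simp only [Prod.mk.injEq]
    refine ⟨?_, ?_⟩
    · apply List.ext_getElem
      · simp only [List.length_append, List.length_map, List.length_range,
          pvFillA_fst_length, pvFillA_snd, List.length_drop, hlineslen, hMx]
        show pvM C + (sp.length - pvM C) = max (pvM C) sp.length
        rcases Nat.le_total (pvM C) sp.length with hle | hle
        · rw [Nat.max_eq_right hle]; omega
        · rw [Nat.max_eq_left hle]; omega
      · intro r h1 h2
        have hr2 : r < Nat.max (pvM C) sp.length := by
          simp only [List.length_map, List.length_range, hMx] at h2
          exact h2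
        by_cases hrM : r < pvM C
        · have hrf : r < (pvFillA m lines sp).1.length := by
            rw [pvFillA_fst_length, hlineslen]; omega
          rw [List.getElem_append_left hrf]
          rw [pvFillA_fst_get m lines sp r (by rw [hlineslen]; exact hrM) hrf]
          have hex : ∃ p ∈ C, r < p.1.length := by
            rcases pv_exists_of_lt_foldl_max (a := 0) hrM with h0 | ⟨x, hx, hrx⟩
            · omega
            · obtain ⟨p, hp, rfl⟩ := List.mem_map.mp hx
              exact ⟨p, hp, hrx⟩
          simp only [List.getElem_map, List.getElem_range]
          rw [pvRowB_snoc_found sepL r _ C [] hex]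
          simp [hlines, pvCellB, pvCellPadA, List.append_assoc]
        · have hge : (pvFillA m lines sp).1.length ≤ r := by
            rw [pvFillA_fst_length, hlineslen]; omega
          rw [List.getElem_append_right hge]
          have hsnd : (pvFillA m lines sp).2 = sp.drop (pvM C) := by
            rw [pvFillA_snd, hlineslen]
          have hrs : r < sp.length := by
            rcases lt_max_iff.mp hr2 with h | h
            · omega
            · exact h
          have hall : ∀ p ∈ C, p.1.length ≤ r := by
            intro p hp
            have hmem : p.1.length ∈ C.map (fun p => p.1.length) :=
              List.mem_map_of_mem hp
            have := pv_le_foldl_max hmem 0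
            have hM : pvM C ≤ r := by omega
            calc p.1.length ≤ pvM C := this
              _ ≤ r := hM
          simp only [List.getElem_map, List.getElem_range]
          rw [pvRowB_all_ge sepL r [(sp, m)] C [] hall]
          simp only [pvRowB]
          rw [if_pos hrs]
          simp only [hsnd, pvFillA_fst_length, hlineslen,
            List.getElem_drop, List.map_nil, List.flatten_nil, List.append_nil,
            List.nil_append, List.getD_eq_getElem sp [] hrs]
          have hidx : pvM C + (r - pvM C) = r := by omega
          simp [hidx]
    · rw [pvE_snoc]

-- ===== VERDICT (by name: the statement is the Claim_ definition above) =====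
theorem combine_multiline_strings_spec : Claim_equal_combine_multiline_strings := by
  intro strings sep _hdom hpre
  unfold Spec_combine_multiline_strings
  have hne : ∀ s ∈ strings, s ≠ "" := fun s hs h => hpre (h ▸ hs)
  simp only [combine_multiline_strings, combine_multiline_strings_alt]
  rw [pvInvA sep.toList strings hne]
  have hcols : (strings.map (fun s => PySem.Chars.splitlines s.toList)).zip
      ((strings.map (fun s => PySem.Chars.splitlines s.toList)).map
        (fun sp => (sp.map List.length).foldl Nat.max 0)) = pvCols strings := by
    rw [List.map_map, List.zip_map']
    simp [pvCols, Function.comp]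
  have hrows : ((strings.map (fun s => PySem.Chars.splitlines s.toList)).map List.length).foldl
      Nat.max 0 = pvM (pvCols strings) := by
    simp [pvM, pvCols, List.map_map, Function.comp_def]
  rw [hcols, hrows]
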